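-- pv_equiv track=rewrite | github.com/rohit-2019/HackerRank-Certification | Problem Solving (Basic)/Gaming Laptop Battery Life/solve.py | getBattery
-- ===== SOURCE A (Python) =====
-- def getBattery(events):
--     charge = 50
--     for i in events:
--         if charge+i>100:
--             charge=100
--         else:
--             charge+=i
--     return charge
-- ===== SOURCE B (Python) =====
-- def getBattery(events):
--     # Reverse pass with suffix sums instead of forward simulation:
--     # result = min(50 + total, min over positions of (100 + suffix sum after it)).
--     S = 0
--     best = None
--     for i in reversed(events):
--         b = 100 + S
--         best = b if best is None else min(best, b)
--         S += i
--     if best is None: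
--         return 50 + S
--     return min(50 + S, best)
-- ===== Notes on version B (the rewrite author's own statement) =====
-- stated objective: alternative
-- what changed: Replaces the forward clamped simulation by a single reverse pass over suffix sums: the answer is min(50+total, min over positions of 100 + suffix-sum after that position), exploiting that the clamp is upper-only.
import Mathlib
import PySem

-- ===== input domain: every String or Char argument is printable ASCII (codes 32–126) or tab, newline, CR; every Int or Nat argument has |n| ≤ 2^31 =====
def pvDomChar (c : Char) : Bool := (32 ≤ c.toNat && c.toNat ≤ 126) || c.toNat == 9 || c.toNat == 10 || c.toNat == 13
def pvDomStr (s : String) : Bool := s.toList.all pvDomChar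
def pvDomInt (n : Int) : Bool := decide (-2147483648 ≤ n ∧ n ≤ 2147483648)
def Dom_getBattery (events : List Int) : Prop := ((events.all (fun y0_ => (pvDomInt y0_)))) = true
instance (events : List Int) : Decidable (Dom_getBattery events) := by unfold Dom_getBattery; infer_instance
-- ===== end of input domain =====

-- B replaces the forward clamped simulation by one reverse pass over suffix sums (alternative algorithm, same cost).

-- ===== PORT A =====
def getBattery (events : List Int) : Int :=
  events.foldl (fun charge i => if charge + i > 100 then 100 else charge + i) 50

-- ===== PORT B =====
def getBattery_alt (events : List Int) : Int :=
  let st := events.reverse.foldl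
    (fun (p : Int × Option Int) i =>
      let b := 100 + p.1
      (p.1 + i, match p.2 with | none => some b | some m => some (min m b)))
    ((0 : Int), (none : Option Int))
  match st.2 with
  | none => 50 + st.1
  | some best => min (50 + st.1) best

-- ===== PRECONDITION & SPEC =====
def Spec_getBattery (events : List Int) (out : Int) : Prop := out = getBattery_alt events
instance (events : List Int) (out : Int) : Decidable (Spec_getBattery events out) := by unfold Spec_getBattery; infer_instance

-- ===== CLAIM (what is proved, stated in full; the proofs are below) =====
def Claim_equal_getBattery : Prop := ∀ (events : List Int), Dom_getBattery events → Spec_getBattery events (getBattery events)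

-- ===== LEMMAS AND PROOFS =====

-- min over proper tails t of the list of (100 + t.sum); none for the empty list
def pvMspec : List Int → Option Int
  | [] => none
  | _ :: es =>
    some (match pvMspec es with
          | none => 100 + es.sum
          | some m => min (100 + es.sum) m)

theorem pvA_char (es : List Int) (c : Int) :
    es.foldl (fun charge i => if charge + i > 100 then 100 else charge + i) c =
      (match pvMspec es with
       | none => c + es.sum
       | some m => min (c + es.sum) m) := by
  induction es generalizing c with
  | nil => simp [pvMspec]
  | cons e es ih =>
    simp only [List.foldl_cons, ih, pvMspec, List.sum_cons]
    cases h : pvMspec es with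
    | none => simp only [min_def]; split_ifs <;> (first | omega | linarith)
    | some m => simp only [min_def]; split_ifs <;> (first | omega | linarith)

theorem pvB_state (es : List Int) :
    es.reverse.foldl
      (fun (p : Int × Option Int) i =>
        let b := 100 + p.1
        (p.1 + i, match p.2 with | none => some b | some m => some (min m b)))
      ((0 : Int), (none : Option Int)) = (es.sum, pvMspec es) := by
  rw [List.foldl_reverse]
  induction es with
  | nil => simp [pvMspec]
  | cons e es ih =>
    simp only [List.foldr_cons, ih, pvMspec, List.sum_cons]
    cases h : pvMspec es with
    | none => refine Prod.ext (by ring) (by rfl)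
    | some m =>
      refine Prod.ext (by ring) ?_
      simp only [Option.some.injEq, min_def]
      split_ifs <;> omega

-- ===== VERDICT (by name: the statement is the Claim_ definition above) =====
theorem getBattery_spec : Claim_equal_getBattery := by
  intro events _
  unfold Spec_getBattery getBattery getBattery_alt
  rw [pvB_state, pvA_char]
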